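-- pv_equiv track=rewrite | github.com/wahabk/ctfishpy | ctfishpy/GUI.py | assign_circle_order
-- ===== SOURCE A (Python) =====
-- def inside_circle( x, y, a, b, r):
-- 	#check if point x, y is in circle with centre and radius a, b ,r
-- 	return (x - a)**2 + (y - b)**2 < r**2
--
-- def assign_circle_order(pos, circles, ordered_circles):
-- 	#check if the click is in a circle
-- 	#add to ordered_circles
-- 	x, y = pos
-- 	for (a, b, r) in circles:
-- 		if inside_circle(x, y, a, b, r):
-- 			#check circle not already in order
-- 			if len(ordered_circles)>0 and True in [inside_circle(x,y,i,j,k) for (i,j,k) in ordered_circles]: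
-- 				return ordered_circles
-- 			ordered_circles.append([a, b, r])
--
-- 	return ordered_circles
-- ===== SOURCE B (Python) =====
-- def inside_circle(x, y, a, b, r):
--     return (x - a)**2 + (y - b)**2 < r**2
--
-- def assign_circle_order(pos, circles, ordered_circles):
--     # Back-to-front scan: overwrite `hit` on every containing circle, so after the
--     # reversed pass `hit` holds the FIRST containing circle of `circles`; then a
--     # single count over ordered_circles decides whether the click is already ordered.
--     x, y = pos
--     hit = None
--     for a, b, r in reversed(circles):
--         if inside_circle(x, y, a, b, r):
--             hit = [a, b, r]
--     if hit is not None and sum(inside_circle(x, y, i, j, k) for i, j, k in ordered_circles) == 0: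
--         ordered_circles.append(hit)
--     return ordered_circles
-- ===== Notes on version B (the rewrite author's own statement) =====
-- stated objective: alternative
-- what changed: B scans circles back-to-front accumulating the last overwrite (= first containing circle) instead of A's forward loop with early return and per-match re-check of ordered_circles, and decides 'already ordered' by a single arithmetic count over ordered_circles performed once after the scan.
import Mathlib
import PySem

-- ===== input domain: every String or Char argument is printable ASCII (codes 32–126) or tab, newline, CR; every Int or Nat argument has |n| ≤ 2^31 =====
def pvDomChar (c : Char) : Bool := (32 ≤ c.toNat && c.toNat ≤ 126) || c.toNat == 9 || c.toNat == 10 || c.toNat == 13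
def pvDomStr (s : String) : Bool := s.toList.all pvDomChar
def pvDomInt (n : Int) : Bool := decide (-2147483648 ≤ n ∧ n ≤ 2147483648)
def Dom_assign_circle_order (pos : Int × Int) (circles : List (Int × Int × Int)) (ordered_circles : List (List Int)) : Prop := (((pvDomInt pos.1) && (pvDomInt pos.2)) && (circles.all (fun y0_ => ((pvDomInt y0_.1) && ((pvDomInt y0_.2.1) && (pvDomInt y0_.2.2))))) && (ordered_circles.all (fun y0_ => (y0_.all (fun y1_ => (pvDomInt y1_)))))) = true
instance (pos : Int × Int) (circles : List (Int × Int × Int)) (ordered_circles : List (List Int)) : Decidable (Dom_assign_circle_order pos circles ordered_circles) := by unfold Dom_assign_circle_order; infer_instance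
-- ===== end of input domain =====

-- B scans circles back-to-front keeping the last overwrite (= first containing circle) and then
-- counts containing ordered circles once, instead of A's forward loop with early return and
-- per-match re-check; objective: alternative. Both Pythons append to ordered_circles in place
-- identically on Pre_; the equivalence proved is about the return value.


-- ===== PORT A =====
def insideCircle (x y a b r : Int) : Bool := (x - a) ^ 2 + (y - b) ^ 2 < r ^ 2

-- 'True in [inside_circle(x,y,i,j,k) for (i,j,k) in ordered_circles]'; the 3-way unpack is exact
-- under Pre_ (every entry has length 3; getD is only a totalisation outside Pre_).
def anyOrdered (x y : Int) (ordered_circles : List (List Int)) : Bool :=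
  ordered_circles.any (fun l => insideCircle x y (l.getD 0 0) (l.getD 1 0) (l.getD 2 0))

-- A's for-loop over circles, carrying ordered_circles, with its early return
def acoLoop (x y : Int) : List (Int × Int × Int) → List (List Int) → List (List Int)
  | [], oc => oc
  | (a, b, r) :: rest, oc =>
    if insideCircle x y a b r then
      if oc.length > 0 && anyOrdered x y oc then oc
      else acoLoop x y rest (oc ++ [[a, b, r]])
    else acoLoop x y rest oc

def assign_circle_order (pos : Int × Int) (circles : List (Int × Int × Int)) (ordered_circles : List (List Int)) : List (List Int) :=
  acoLoop pos.1 pos.2 circles ordered_circles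

-- ===== PORT B =====
-- B's 'for a, b, r in reversed(circles): if inside: hit = [a, b, r]' accumulator loop
def hitScan (x y : Int) (circles : List (Int × Int × Int)) : Option (List Int) :=
  circles.reverse.foldl
    (fun hit c => if insideCircle x y c.1 c.2.1 c.2.2 then some [c.1, c.2.1, c.2.2] else hit)
    none

-- B's 'sum(inside_circle(x, y, i, j, k) for i, j, k in ordered_circles)' (True counts as 1)
def orderedCount (x y : Int) (ordered_circles : List (List Int)) : Int :=
  (ordered_circles.map
    (fun l => if insideCircle x y (l.getD 0 0) (l.getD 1 0) (l.getD 2 0) then (1 : Int) else 0)).sum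

def assign_circle_order_alt (pos : Int × Int) (circles : List (Int × Int × Int)) (ordered_circles : List (List Int)) : List (List Int) :=
  let x := pos.1
  let y := pos.2
  match hitScan x y circles with
  | none => ordered_circles
  | some h => if orderedCount x y ordered_circles = 0 then ordered_circles ++ [h] else ordered_circles

-- ===== PRECONDITION & SPEC =====
-- Pre_ excludes exactly the inputs where the Python A raises ValueError: some circle contains the
-- click (so the list comprehension over ordered_circles is evaluated) while some ordered entry is
-- not a 3-element triple and cannot be unpacked (B's generator raises there too).
def Pre_assign_circle_order (pos : Int × Int) (circles : List (Int × Int × Int)) (ordered_circles : List (List Int)) : Prop :=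
  (∃ c ∈ circles, insideCircle pos.1 pos.2 c.1 c.2.1 c.2.2 = true) →
    ∀ l ∈ ordered_circles, l.length = 3
instance (pos : Int × Int) (circles : List (Int × Int × Int)) (ordered_circles : List (List Int)) : Decidable (Pre_assign_circle_order pos circles ordered_circles) := by unfold Pre_assign_circle_order; infer_instance

def pvWitness_assign_circle_order : (Int × Int) × (List (Int × Int × Int)) × List (List Int) :=
  ((1, 1), [(0, 0, 5), (1, 1, 2)], [[7, 7, 1]])

def Spec_assign_circle_order (pos : Int × Int) (circles : List (Int × Int × Int)) (ordered_circles : List (List Int)) (out : List (List Int)) : Prop := out = assign_circle_order_alt pos circles ordered_circles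
instance (pos : Int × Int) (circles : List (Int × Int × Int)) (ordered_circles : List (List Int)) (out : List (List Int)) : Decidable (Spec_assign_circle_order pos circles ordered_circles out) := by unfold Spec_assign_circle_order; infer_instance

-- ===== CLAIM (what is proved, stated in full; the proofs are below) =====
def Claim_equal_assign_circle_order : Prop := ∀ (pos : Int × Int) (circles : List (Int × Int × Int)) (ordered_circles : List (List Int)), Dom_assign_circle_order pos circles ordered_circles → Pre_assign_circle_order pos circles ordered_circles → Spec_assign_circle_order pos circles ordered_circles (assign_circle_order pos circles ordered_circles)

-- ===== LEMMAS AND PROOFS =====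

-- the reversed overwrite-scan yields the first containing circle
lemma hitScan_eq_find (x y : Int) (cs : List (Int × Int × Int)) :
    hitScan x y cs =
      (cs.find? (fun c => insideCircle x y c.1 c.2.1 c.2.2)).map
        (fun c => [c.1, c.2.1, c.2.2]) := by
  induction cs with
  | nil => rfl
  | cons c rest ih =>
    unfold hitScan at *
    rw [List.reverse_cons, List.foldl_append, ih]
    by_cases hc : insideCircle x y c.1 c.2.1 c.2.2 = true
    · rw [List.find?_cons_of_pos (p := fun c : Int × Int × Int => insideCircle x y c.1 c.2.1 c.2.2) (by simpa using hc)]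
      simp [hc]
    · rw [List.find?_cons_of_neg (p := fun c : Int × Int × Int => insideCircle x y c.1 c.2.1 c.2.2) (by simpa using hc)]
      simp [hc]

-- the count is zero iff no ordered circle contains the click
lemma orderedCount_eq_zero_iff (x y : Int) (oc : List (List Int)) :
    orderedCount x y oc = 0 ↔ anyOrdered x y oc = false := by
  induction oc with
  | nil => simp [orderedCount, anyOrdered]
  | cons l rest ih =>
    have hnn : 0 ≤ orderedCount x y rest := by
      unfold orderedCount
      apply List.sum_nonneg
      intro i hi
      simp only [List.mem_map] at hi
      obtain ⟨_, _, rfl⟩ := hi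
      split <;> norm_num
    unfold orderedCount anyOrdered at *
    simp only [List.map_cons, List.sum_cons, List.any_cons]
    by_cases hl : insideCircle x y (l.getD 0 0) (l.getD 1 0) (l.getD 2 0) = true
    · simp only [hl, if_pos, Bool.true_or]
      constructor
      · intro h; omega
      · intro h; cases h
    · rw [eq_false_of_ne_true hl]
      simpa using ih

-- once some ordered circle contains the click, A's loop returns oc unchanged
lemma acoLoop_fixed (x y : Int) (cs : List (Int × Int × Int)) (oc : List (List Int))
    (h : anyOrdered x y oc = true) : acoLoop x y cs oc = oc := by
  induction cs with
  | nil => rfl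
  | cons c rest ih =>
    obtain ⟨a, b, r⟩ := c
    by_cases hc : insideCircle x y a b r = true
    · have hne : oc ≠ [] := by
        intro hnil; rw [hnil] at h; simp [anyOrdered] at h
      have hlen : oc.length > 0 := List.length_pos_iff.mpr hne
      simp [acoLoop, hc, h, hlen]
    · simp [acoLoop, hc, ih]

-- the appended circle contains the click, so anyOrdered becomes true
lemma anyOrdered_append (x y a b r : Int) (oc : List (List Int))
    (hc : insideCircle x y a b r = true) :
    anyOrdered x y (oc ++ [[a, b, r]]) = true := by
  simp [anyOrdered, List.any_append]
  right
  simpa using hc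

-- A's loop, characterised through the first containing circle
lemma acoLoop_eq_find (x y : Int) (cs : List (Int × Int × Int)) (oc : List (List Int)) :
    acoLoop x y cs oc =
      match cs.find? (fun c => insideCircle x y c.1 c.2.1 c.2.2) with
      | none => oc
      | some (a, b, r) => if anyOrdered x y oc then oc else oc ++ [[a, b, r]] := by
  induction cs with
  | nil => rfl
  | cons c rest ih =>
    obtain ⟨a, b, r⟩ := c
    by_cases hc : insideCircle x y a b r = true
    · rw [List.find?_cons_of_pos (p := fun c : Int × Int × Int => insideCircle x y c.1 c.2.1 c.2.2) (by simpa using hc)]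
      by_cases ho : anyOrdered x y oc = true
      · have hne : oc ≠ [] := by
          intro hnil; rw [hnil] at ho; simp [anyOrdered] at ho
        have hlen : oc.length > 0 := List.length_pos_iff.mpr hne
        simp [acoLoop, hc, ho, hlen]
      · have hguard : (oc.length > 0 && anyOrdered x y oc) = false := by
          simp [ho]
        have : acoLoop x y ((a, b, r) :: rest) oc = acoLoop x y rest (oc ++ [[a, b, r]]) := by
          simp [acoLoop, hc, hguard]
        rw [this, acoLoop_fixed x y rest _ (anyOrdered_append x y a b r oc hc)]
        simp [ho]
    · rw [List.find?_cons_of_neg (p := fun c : Int × Int × Int => insideCircle x y c.1 c.2.1 c.2.2) (by simpa using hc)]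
      simp [acoLoop, hc, ih]

-- ===== VERDICT (by name: the statement is the Claim_ definition above) =====
theorem assign_circle_order_spec : Claim_equal_assign_circle_order := by
  intro pos circles ordered_circles _ _
  show _ = _
  simp only [assign_circle_order, assign_circle_order_alt, hitScan_eq_find,
    acoLoop_eq_find]
  cases hf : circles.find? (fun c => insideCircle pos.1 pos.2 c.1 c.2.1 c.2.2) with
  | none => rfl
  | some c =>
    obtain ⟨a, b, r⟩ := c
    simp only [Option.map_some]
    by_cases ho : anyOrdered pos.1 pos.2 ordered_circles = true
    · have : ¬ orderedCount pos.1 pos.2 ordered_circles = 0 := by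
        rw [orderedCount_eq_zero_iff]; simp [ho]
      simp [ho, this]
    · have : orderedCount pos.1 pos.2 ordered_circles = 0 := by
        rw [orderedCount_eq_zero_iff]; simpa using ho
      simp [ho, this]
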